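-- pv_equiv track=rewrite | github.com/kravitzcoder/stealth-testing-playwright | src/runners/base_runner.py | _is_valid_public_ip
-- ===== SOURCE A (Python) =====
-- def _is_valid_public_ip(ip_str: str) -> bool:
--     """Check if IP is valid and public (not private/reserved)"""
--     try:
--         parts = [int(p) for p in ip_str.split('.')]
--
--         if len(parts) != 4:
--             return False
--
--         # Check valid range
--         if any(p < 0 or p > 255 for p in parts):
--             return False
--
--         # Filter private/reserved IPs
--         if parts[0] == 10:  # 10.0.0.0/8
--             return False
--         if parts[0] == 172 and 16 <= parts[1] <= 31:  # 172.16.0.0/12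
--             return False
--         if parts[0] == 192 and parts[1] == 168:  # 192.168.0.0/16
--             return False
--         if parts[0] == 127:  # 127.0.0.0/8 (localhost)
--             return False
--         if parts[0] == 169 and parts[1] == 254:  # 169.254.0.0/16 (link-local)
--             return False
--
--         return True
--     except:
--         return False
-- ===== SOURCE B (Python) =====
-- # B: pack the four octets into one 32-bit integer (Horner) and test membership
-- # in the reserved CIDR blocks as half-open integer ranges, instead of A's
-- # per-octet comparison chain.
--
-- _RESERVED_RANGES = [
--     (10 << 24, 11 << 24),                              # 10.0.0.0/8
--     ((172 << 24) + (16 << 16), (172 << 24) + (32 << 16)),   # 172.16.0.0/12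
--     ((192 << 24) + (168 << 16), (192 << 24) + (169 << 16)), # 192.168.0.0/16
--     (127 << 24, 128 << 24),                            # 127.0.0.0/8
--     ((169 << 24) + (254 << 16), (169 << 24) + (255 << 16)), # 169.254.0.0/16
-- ]
--
--
-- def _is_valid_public_ip(ip_str: str) -> bool:
--     try:
--         parts = [int(p) for p in ip_str.split('.')]
--     except ValueError:
--         return False
--     if len(parts) != 4 or not all(0 <= p <= 255 for p in parts):
--         return False
--     v = 0
--     for p in parts:
--         v = v * 256 + p
--     return all(not (lo <= v < hi) for lo, hi in _RESERVED_RANGES)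
-- ===== Notes on version B (the rewrite author's own statement) =====
-- stated objective: alternative
-- what changed: B keeps A's split-and-int parsing but packs the four octets into one 32-bit integer with a Horner loop and rejects reserved addresses by half-open integer-range membership over a data list of CIDR blocks, instead of A's chain of per-octet equality/interval branches.
import Mathlib
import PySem

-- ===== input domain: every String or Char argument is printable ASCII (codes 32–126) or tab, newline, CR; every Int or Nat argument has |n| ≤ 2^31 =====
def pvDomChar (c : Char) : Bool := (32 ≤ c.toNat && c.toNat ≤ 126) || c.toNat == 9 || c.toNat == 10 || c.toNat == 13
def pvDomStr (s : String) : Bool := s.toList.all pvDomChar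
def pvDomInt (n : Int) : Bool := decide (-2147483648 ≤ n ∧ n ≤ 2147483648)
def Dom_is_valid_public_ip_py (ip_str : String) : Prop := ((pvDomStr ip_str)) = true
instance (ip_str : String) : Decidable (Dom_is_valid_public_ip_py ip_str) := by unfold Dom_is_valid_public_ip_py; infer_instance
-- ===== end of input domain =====

-- B replaces A's per-octet comparison chain by packing the octets into one
-- 32-bit integer and testing membership in reserved CIDR blocks as integer
-- ranges (alternative formulation, same cost).


-- ===== PORT A =====
-- parts: split the string on the dot separator, int() each piece; any failure hits the bare
-- except and returns False (the separator is nonempty, so split? is always some).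
def is_valid_public_ip_py (ip_str : String) : Bool :=
  match ((PySem.Str.split? ip_str ".").getD []).mapM PySem.Int.ofStr? with
  | none => false
  | some parts =>
    if parts.length ≠ 4 then false
    else if parts.any (fun p => p < 0 || 255 < p) then false
    else
      match parts with
      | [p0, p1, _, _] =>
        if p0 = 10 then false
        else if p0 = 172 ∧ 16 ≤ p1 ∧ p1 ≤ 31 then false
        else if p0 = 192 ∧ p1 = 168 then false
        else if p0 = 127 then false
        else if p0 = 169 ∧ p1 = 254 then false
        else true
      | _ => false  -- unreachable: length = 4

-- ===== PORT B =====
def reservedRanges : List (Int × Int) :=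
  [(10 * 2^24, 11 * 2^24),
   (172 * 2^24 + 16 * 2^16, 172 * 2^24 + 32 * 2^16),
   (192 * 2^24 + 168 * 2^16, 192 * 2^24 + 169 * 2^16),
   (127 * 2^24, 128 * 2^24),
   (169 * 2^24 + 254 * 2^16, 169 * 2^24 + 255 * 2^16)]

def is_valid_public_ip_py_alt (ip_str : String) : Bool :=
  match ((PySem.Str.split? ip_str ".").getD []).mapM PySem.Int.ofStr? with
  | none => false
  | some parts =>
    if parts.length = 4 && parts.all (fun p => 0 ≤ p && p ≤ 255) then
      let v := parts.foldl (fun acc p => acc * 256 + p) 0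
      reservedRanges.all (fun r => !(r.1 ≤ v && v < r.2))
    else false

-- ===== PRECONDITION & SPEC =====
def Spec_is_valid_public_ip_py (ip_str : String) (out : Bool) : Prop := out = is_valid_public_ip_py_alt ip_str
instance (ip_str : String) (out : Bool) : Decidable (Spec_is_valid_public_ip_py ip_str out) := by unfold Spec_is_valid_public_ip_py; infer_instance

-- ===== CLAIM (what is proved, stated in full; the proofs are below) =====
def Claim_equal_is_valid_public_ip_py : Prop := ∀ (ip_str : String), Dom_is_valid_public_ip_py ip_str → Spec_is_valid_public_ip_py ip_str (is_valid_public_ip_py ip_str)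

-- ===== LEMMAS AND PROOFS =====

theorem is_valid_public_ip_py_eq (ip_str : String) :
    is_valid_public_ip_py ip_str = is_valid_public_ip_py_alt ip_str := by
  unfold is_valid_public_ip_py is_valid_public_ip_py_alt
  cases hm : ((PySem.Str.split? ip_str ".").getD []).mapM PySem.Int.ofStr? with
  | none => rfl
  | some parts =>
    match parts with
    | [] => rfl
    | [_] => rfl
    | [_, _] => rfl
    | [_, _, _] => rfl
    | a :: b :: c :: d :: e :: rest => simp
    | [a, b, c, d] =>
      rw [Bool.eq_iff_iff]
      simp only [reservedRanges, List.length_cons, List.length_nil, List.any_cons,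
        List.any_nil, List.all_cons, List.all_nil, List.foldl, Bool.or_false,
        Bool.and_true]
      split_ifs
      all_goals first
        | omega
        | (simp_all; omega)
        | simp_all

-- ===== VERDICT (by name: the statement is the Claim_ definition above) =====
theorem is_valid_public_ip_py_spec : Claim_equal_is_valid_public_ip_py := by
  intro ip_str _
  unfold Spec_is_valid_public_ip_py
  exact is_valid_public_ip_py_eq ip_str
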